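-- pv_equiv track=rewrite | github.com/drestrepom/mcp_graphql | mcp_graphql/generate_schema.py | generate_official_introspection_query
-- ===== SOURCE A (Python) =====
-- def generate_official_introspection_query(max_depth: int = 7) -> str:
--     """Generate an introspection query that matches the official get-graphql-schema tool.
--
--     Args:
--         max_depth: Maximum nesting depth for type references (1-9)
--
--     Returns:
--         GraphQL introspection query
--
--     """
--     # Ensure max_depth is within reasonable bounds
--     max_depth = max(1, min(9, max_depth))
--
--     # Build the TypeRef fragment with the correct nesting depth
--     type_ref_lines = ["fragment TypeRef on __Type {", "  kind", "  name"]
--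
--     current_indent = "  "
--     for _i in range(max_depth):
--         current_indent += "  "
--         type_ref_lines.append(f"{current_indent[:-2]}ofType {{")
--         type_ref_lines.append(f"{current_indent}kind")
--         type_ref_lines.append(f"{current_indent}name")
--
--     # Close brackets
--     for _i in range(max_depth):
--         current_indent = current_indent[:-2]
--         type_ref_lines.append(f"{current_indent}}}")
--
--     type_ref_lines.append("}")
--     type_ref_fragment = "\n".join(type_ref_lines)
--
--     # Main query that matches the official get-graphql-schema format
--     return (
--         """
-- query IntrospectionQuery {
--   __schema {
--     queryType { name }
--     mutationType { name }
--     subscriptionType { name }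
--     types {
--       ...FullType
--     }
--     directives {
--       name
--       description
--       locations
--       args {
--         ...InputValue
--       }
--     }
--   }
-- }
--
-- fragment FullType on __Type {
--   kind
--   name
--   description
--   fields(includeDeprecated: true) {
--     name
--     description
--     args {
--       ...InputValue
--     }
--     type {
--       ...TypeRef
--     }
--     isDeprecated
--     deprecationReason
--   }
--   inputFields {
--     ...InputValue
--   }
--   interfaces {
--     ...TypeRef
--   }
--   enumValues(includeDeprecated: true) {
--     name
--     description
--     isDeprecated
--     deprecationReason
--   }
--   possibleTypes {
--     ...TypeRef
--   }
-- }
--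
-- fragment InputValue on __InputValue {
--   name
--   description
--   type { ...TypeRef }
--   defaultValue
-- }
--
-- """
--         + type_ref_fragment
--     )
-- ===== SOURCE B (Python) =====
-- def generate_official_introspection_query(max_depth: int = 7) -> str:
--     """Generate an introspection query that matches the official get-graphql-schema tool."""
--     depth = max(1, min(9, max_depth))
--
--     def block(level: int, indent: str) -> list:
--         if level == 0:
--             return []
--         return (
--             [indent + "ofType {", indent + "  kind", indent + "  name"]
--             + block(level - 1, indent + "  ")
--             + [indent + "}"]
--         )
--
--     fragment = "\n".join(
--         ["fragment TypeRef on __Type {", "  kind", "  name"]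
--         + block(depth, "  ")
--         + ["}"]
--     )
--
--     return (
--         """
-- query IntrospectionQuery {
--   __schema {
--     queryType { name }
--     mutationType { name }
--     subscriptionType { name }
--     types {
--       ...FullType
--     }
--     directives {
--       name
--       description
--       locations
--       args {
--         ...InputValue
--       }
--     }
--   }
-- }
--
-- fragment FullType on __Type {
--   kind
--   name
--   description
--   fields(includeDeprecated: true) {
--     name
--     description
--     args {
--       ...InputValue
--     }
--     type {
--       ...TypeRef
--     }
--     isDeprecated
--     deprecationReason
--   }
--   inputFields {
--     ...InputValue
--   }
--   interfaces {
--     ...TypeRef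
--   }
--   enumValues(includeDeprecated: true) {
--     name
--     description
--     isDeprecated
--     deprecationReason
--   }
--   possibleTypes {
--     ...TypeRef
--   }
-- }
--
-- fragment InputValue on __InputValue {
--   name
--   description
--   type { ...TypeRef }
--   defaultValue
-- }
--
-- """
--         + fragment
--     )
-- ===== Notes on version B (the rewrite author's own statement) =====
-- stated objective: simpler
-- what changed: Replaces A's two sequential loops (open-nesting loop plus close-bracket loop with manual indent slicing) by a single recursive helper that emits each ofType level together with its matching close bracket.
import Mathlib
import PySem

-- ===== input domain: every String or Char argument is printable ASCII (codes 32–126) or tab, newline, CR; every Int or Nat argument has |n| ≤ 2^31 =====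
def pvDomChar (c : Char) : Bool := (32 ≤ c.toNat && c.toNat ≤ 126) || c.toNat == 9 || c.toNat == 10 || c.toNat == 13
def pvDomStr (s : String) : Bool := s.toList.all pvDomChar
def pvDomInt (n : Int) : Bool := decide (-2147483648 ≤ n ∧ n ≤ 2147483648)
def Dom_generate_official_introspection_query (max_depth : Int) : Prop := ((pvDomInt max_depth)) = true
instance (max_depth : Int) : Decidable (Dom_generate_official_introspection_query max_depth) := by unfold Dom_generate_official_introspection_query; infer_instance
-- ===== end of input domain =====

-- B replaces A's two sequential loops (open-nesting loop, then close-bracket loop with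
-- manual indent slicing) by one recursive helper that emits each ofType level together
-- with its matching close bracket (objective: simpler).

-- shared constant: the fixed main-query prefix both Pythons return verbatim
def pvHeader : String := "\nquery IntrospectionQuery {\n  __schema {\n    queryType { name }\n    mutationType { name }\n    subscriptionType { name }\n    types {\n      ...FullType\n    }\n    directives {\n      name\n      description\n      locations\n      args {\n        ...InputValue\n      }\n    }\n  }\n}\n\nfragment FullType on __Type {\n  kind\n  name\n  description\n  fields(includeDeprecated: true) {\n    name\n    description\n    args {\n      ...InputValue\n    }\n    type {\n      ...TypeRef\n    }\n    isDeprecated\n    deprecationReason\n  }\n  inputFields {\n    ...InputValue\n  }\n  interfaces {\n    ...TypeRef\n  }\n  enumValues(includeDeprecated: true) {\n    name\n    description\n    isDeprecated\n    deprecationReason\n  }\n  possibleTypes {\n    ...TypeRef\n  }\n}\n\nfragment InputValue on __InputValue {\n  name\n  description\n  type { ...TypeRef }\n  defaultValue\n}\n\n"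

-- ===== PORT A =====
-- A's first loop: state = (type_ref_lines, current_indent); ported on List Char (PySem convention)
def fragStateA (n : Nat) : List (List Char) × List Char :=
  (List.range n).foldl
    (fun st _ =>
      let ind := st.2 ++ "  ".toList
      (st.1 ++ [PySem.List.slice ind none (some (-2)) ++ "ofType {".toList,
                ind ++ "kind".toList, ind ++ "name".toList], ind))
    (["fragment TypeRef on __Type {".toList, "  kind".toList, "  name".toList], "  ".toList)

-- A's second loop: shrinks current_indent, appends close brackets; then the final "}"
def fragLinesA (n : Nat) : List (List Char) :=
  let st := (List.range n).foldl
    (fun (st : List (List Char) × List Char) _ =>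
      let ind := PySem.List.slice st.2 none (some (-2))
      (st.1 ++ [ind ++ "}".toList], ind)) (fragStateA n)
  st.1 ++ ["}".toList]

def generate_official_introspection_query (max_depth : Int) : String :=
  String.ofList (pvHeader.toList ++
    PySem.Chars.join ['\n'] (fragLinesA (max 1 (min 9 max_depth)).toNat))

-- ===== PORT B =====
-- B's recursive block builder: one level's ofType lines, the inner block, the close bracket
def altBlock : Nat → List Char → List (List Char)
  | 0, _ => []
  | n+1, ind =>
      (ind ++ "ofType {".toList) :: (ind ++ "  kind".toList) :: (ind ++ "  name".toList) ::
        (altBlock n (ind ++ "  ".toList) ++ [ind ++ "}".toList])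

def fragLinesB (n : Nat) : List (List Char) :=
  ["fragment TypeRef on __Type {".toList, "  kind".toList, "  name".toList]
    ++ altBlock n "  ".toList ++ ["}".toList]

def generate_official_introspection_query_alt (max_depth : Int) : String :=
  String.ofList (pvHeader.toList ++
    PySem.Chars.join ['\n'] (fragLinesB (max 1 (min 9 max_depth)).toNat))

-- ===== PRECONDITION & SPEC =====
def Spec_generate_official_introspection_query (max_depth : Int) (out : String) : Prop := out = generate_official_introspection_query_alt max_depth
instance (max_depth : Int) (out : String) : Decidable (Spec_generate_official_introspection_query max_depth out) := by unfold Spec_generate_official_introspection_query; infer_instance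

-- ===== CLAIM (what is proved, stated in full; the proofs are below) =====
def Claim_equal_generate_official_introspection_query : Prop := ∀ (max_depth : Int), Dom_generate_official_introspection_query max_depth → Spec_generate_official_introspection_query max_depth (generate_official_introspection_query max_depth)

-- ===== LEMMAS AND PROOFS =====

-- the fragment lines agree for every clamped depth 1‥9 (kernel evaluation per case)
theorem fragLines_eq (n : Nat) (h1 : 1 ≤ n) (h2 : n ≤ 9) : fragLinesA n = fragLinesB n := by
  interval_cases n <;> decide

theorem clamp_bounds (max_depth : Int) :
    1 ≤ (max 1 (min 9 max_depth)).toNat ∧ (max 1 (min 9 max_depth)).toNat ≤ 9 := by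
  constructor <;> omega

-- ===== VERDICT (by name: the statement is the Claim_ definition above) =====
theorem generate_official_introspection_query_spec : Claim_equal_generate_official_introspection_query := by
  intro md _
  unfold Spec_generate_official_introspection_query generate_official_introspection_query
    generate_official_introspection_query_alt
  obtain ⟨h1, h2⟩ := clamp_bounds md
  rw [fragLines_eq _ h1 h2]
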